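-- pv_equiv track=rewrite | github.com/yeolsim2hajo/Team_hard | wonkyoung/programmers/level 0/공_던지기.py | solution
-- ===== SOURCE A (Python) =====
-- def solution(numbers, k):
--     length = len(numbers)
--     half, remain = divmod(length, 2)
--     if remain == 0:
--         index = (k-1)%half
--         return numbers[2*index]
--     index = (k-1)%length
--     for i in range(1, length//2+1):
--         number = numbers.pop(i)
--         numbers.append(number)
--     return numbers[index]
-- ===== SOURCE B (Python) =====
-- def solution(numbers, k):
--     return numbers[2 * (k - 1) % len(numbers)]
-- ===== Notes on version B (the rewrite author's own statement) =====
-- stated objective: simpler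
-- what changed: Replaces the even/odd case split with its O(n) pop/append list-rebuilding loop by the single closed-form index numbers[2*(k-1)%len(numbers)], which also leaves the input list unmutated.
import Mathlib
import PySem

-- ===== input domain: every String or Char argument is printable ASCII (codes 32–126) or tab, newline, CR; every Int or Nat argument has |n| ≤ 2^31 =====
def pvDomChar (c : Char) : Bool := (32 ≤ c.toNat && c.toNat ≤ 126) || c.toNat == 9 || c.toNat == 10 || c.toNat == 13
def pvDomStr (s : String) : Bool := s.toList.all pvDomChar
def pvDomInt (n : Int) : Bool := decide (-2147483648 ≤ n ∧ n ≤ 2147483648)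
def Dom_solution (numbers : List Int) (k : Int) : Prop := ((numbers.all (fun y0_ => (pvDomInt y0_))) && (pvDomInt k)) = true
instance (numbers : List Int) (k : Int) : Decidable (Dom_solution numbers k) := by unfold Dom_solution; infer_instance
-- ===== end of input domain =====

-- B replaces A's even/odd case split with its pop/append list-rebuilding loop by the single
-- closed-form index numbers[2*(k-1) % len(numbers)] (simpler; no speed claim).  A mutates
-- `numbers` in place in the odd-length branch (pop/append), B does not; the equivalence
-- proved here is about the RETURN value only.

-- ===== PORT A =====
-- one iteration of A's loop body: `number = numbers.pop(i); numbers.append(number)`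
-- (the `none` branch is Python's IndexError; under Pre_ the popped index is always in range)
def pvStep (s : List Int) (i : Int) : List Int :=
  match PySem.List.pop? s i with
  | some (x, s') => s' ++ [x]
  | none => s

def solution (numbers : List Int) (k : Int) : Int :=
  let length : Int := numbers.length
  let half := PySem.Int.floordiv length 2
  let remain := PySem.Int.mod length 2
  if remain = 0 then
    PySem.List.pyGetD numbers (2 * PySem.Int.mod (k - 1) half) 0
  else
    PySem.List.pyGetD ((PySem.List.pyRange 1 (PySem.Int.floordiv length 2 + 1) 1).foldl pvStep numbers)
      (PySem.Int.mod (k - 1) length) 0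

-- ===== PORT B =====
def solution_alt (numbers : List Int) (k : Int) : Int :=
  PySem.List.pyGetD numbers (PySem.Int.mod (2 * (k - 1)) (numbers.length : Int)) 0

-- ===== PRECONDITION & SPEC =====
-- A raises ZeroDivisionError on the empty list (the `(k-1)%half` with half = 0); excluded.
def Pre_solution (numbers : List Int) (k : Int) : Prop := numbers ≠ []
instance (numbers : List Int) (k : Int) : Decidable (Pre_solution numbers k) := by
  unfold Pre_solution; infer_instance

def pvWitness_solution : List Int × Int := ([1, 2, 3, 4, 5], 7)

def Spec_solution (numbers : List Int) (k : Int) (out : Int) : Prop := out = solution_alt numbers k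
instance (numbers : List Int) (k : Int) (out : Int) : Decidable (Spec_solution numbers k out) := by
  unfold Spec_solution; infer_instance

-- ===== CLAIM (what is proved, stated in full; the proofs are below) =====
def Claim_equal_solution : Prop := ∀ (numbers : List Int) (k : Int), Dom_solution numbers k → Pre_solution numbers k → Spec_solution numbers k (solution numbers k)

-- ===== LEMMAS AND PROOFS =====

-- popping the element right after a prefix E and re-appending it
theorem pvPop_append_cons (E rest : List Int) (a : Int) :
    PySem.List.pop? (E ++ a :: rest) (E.length : Int) = some (a, E ++ rest) := by
  rw [PySem.List.pop?_natCast (E ++ a :: rest) E.length (by simp)]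
  simp [List.eraseIdx_append_of_length_le (le_refl E.length),
    List.getElem_append_right (le_refl E.length)]

-- invariant of A's loop: after t iterations the list holds the elements at even
-- positions 0..2t, then the untouched tail, then the elements at odd positions 1..2t-1
theorem pvFold_inv (xs : List Int) (t : Nat) (h : 2 * t + 1 ≤ xs.length) :
    (PySem.List.pyRange 1 ((t : Int) + 1) 1).foldl pvStep xs
      = (List.range (t + 1)).map (fun j => xs.getD (2 * j) 0)
        ++ xs.drop (2 * t + 1)
        ++ (List.range t).map (fun j => xs.getD (2 * j + 1) 0) := by
  induction t with
  | zero =>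
      rw [PySem.List.pyRange_one_eq_nil (by norm_num)]
      cases xs with
      | nil => simp at h
      | cons x xs => simp [List.range_succ]
  | succ t ih =>
      have ih' := ih (by omega)
      have hb : (1 : Int) ≤ (t : Int) + 1 := by omega
      have hcast : ((t : Nat) + 1 : Nat) = ((t : Int) + 1) := by push_cast; ring
      rw [show ((t + 1 : Nat) : Int) + 1 = ((t : Int) + 1) + 1 by push_cast; ring,
          PySem.List.pyRange_one_succ_right hb, List.foldl_append, ih']
      have hE : ((List.range (t + 1)).map (fun j => xs.getD (2 * j) 0)).length = t + 1 := by simp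
      have hdrop : xs.drop (2 * t + 1) = xs[2 * t + 1] :: xs.drop (2 * t + 2) :=
        List.drop_eq_getElem_cons (by omega)
      have hdrop2 : xs.drop (2 * t + 2) = xs[2 * t + 2] :: xs.drop (2 * t + 3) :=
        List.drop_eq_getElem_cons (by omega)
      have key := pvPop_append_cons ((List.range (t + 1)).map (fun j => xs.getD (2 * j) 0))
        (xs.drop (2 * t + 2) ++ (List.range t).map (fun j => xs.getD (2 * j + 1) 0)) (xs[2 * t + 1])
      rw [hE] at key
      simp only [List.foldl_cons, List.foldl_nil]
      rw [hdrop, pvStep, hcast.symm]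
      simp only [List.append_assoc, List.cons_append] at key ⊢
      rw [key]
      rw [List.range_succ, List.range_succ]
      have g1 : xs.getD (2 * (t + 1)) 0 = xs[2 * t + 2] := by
        rw [show 2 * (t + 1) = 2 * t + 2 by omega]; exact List.getD_eq_getElem _ _ (by omega)
      rw [hdrop2]
      simp only [List.map_append, List.map_cons, List.map_nil, List.append_assoc, List.cons_append,
        List.nil_append, g1]
      have g2 : xs.getD (2 * t + 1) 0 = xs[2 * t + 1] := by
        rw [List.getD_eq_getElem _ _ (by omega)]
      rw [g2]
      conv_rhs => rw [List.range_succ]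
      simp only [List.map_append, List.map_cons, List.map_nil, List.append_assoc, List.cons_append,
        List.nil_append]
      rw [show 2 * (t + 1) + 1 = 2 * t + 3 by omega]

-- the whole of A equals B's closed form, stated on A's (let-expanded) body
theorem pvMain (numbers : List Int) (k : Int) (hpre : numbers ≠ []) :
    (let length : Int := numbers.length
     let half := PySem.Int.floordiv length 2
     let remain := PySem.Int.mod length 2
     if remain = 0 then
       PySem.List.pyGetD numbers (2 * PySem.Int.mod (k - 1) half) 0
     else
       PySem.List.pyGetD ((PySem.List.pyRange 1 (PySem.Int.floordiv length 2 + 1) 1).foldl pvStep numbers)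
         (PySem.Int.mod (k - 1) length) 0)
    = PySem.List.pyGetD numbers (PySem.Int.mod (2 * (k - 1)) (numbers.length : Int)) 0 := by
  have hn : 0 < numbers.length := List.length_pos_of_ne_nil hpre
  have hfd : PySem.Int.floordiv (numbers.length : Int) 2 = (numbers.length : Int) / 2 :=
    PySem.Int.floordiv_eq_ediv_of_pos (by norm_num)
  have hmd : PySem.Int.mod (numbers.length : Int) 2 = (numbers.length : Int) % 2 :=
    PySem.Int.mod_eq_emod_of_pos (by norm_num)
  simp only [hfd, hmd]
  split_ifs with heven
  · -- even length n = 2*(n/2): 2*((k-1) % (n/2)) = (2*(k-1)) % n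
    have hhalf : (0 : Int) < (numbers.length : Int) / 2 := by omega
    have h2 : (numbers.length : Int) = 2 * ((numbers.length : Int) / 2) := by omega
    rw [PySem.Int.mod_eq_emod_of_pos hhalf,
        PySem.Int.mod_eq_emod_of_pos (by omega : (0:Int) < (numbers.length : Int))]
    congr 1
    conv_rhs => rw [h2]
    exact (Int.mul_emod_mul_of_pos _ _ (by norm_num : (0:Int) < 2)).symm
  · -- odd length n = 2*h+1: read the rearranged list through the loop invariant
    have hN : (0 : Int) < (numbers.length : Int) := by omega
    set h : Nat := numbers.length / 2 with hh
    have hodd : numbers.length = 2 * h + 1 := by omega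
    have hub : (numbers.length : Int) / 2 + 1 = ((h : Int)) + 1 := by omega
    rw [hub, pvFold_inv numbers h (by omega)]
    rw [PySem.Int.mod_eq_emod_of_pos hN, PySem.Int.mod_eq_emod_of_pos hN]
    set iA : Int := (k - 1) % (numbers.length : Int) with hiA
    set iB : Int := (2 * (k - 1)) % (numbers.length : Int) with hiB
    have hiA0 : 0 ≤ iA := Int.emod_nonneg _ (by omega)
    have hiA1 : iA < (numbers.length : Int) := Int.emod_lt_of_pos _ hN
    have hiB0 : 0 ≤ iB := Int.emod_nonneg _ (by omega)
    have hiB1 : iB < (numbers.length : Int) := Int.emod_lt_of_pos _ hN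
    have e1 : iB = (2 * iA) % (numbers.length : Int) := by
      have hsplit := Int.mul_ediv_add_emod (k - 1) (numbers.length : Int)
      have : 2 * (k - 1) = 2 * iA + (numbers.length : Int) * (2 * ((k - 1) / (numbers.length : Int))) := by
        rw [hiA]; linear_combination (-2 : Int) * hsplit
      rw [hiB, this, Int.add_mul_emod_self_left]
    have hdropnil : numbers.drop (2 * h + 1) = [] := by
      apply List.drop_eq_nil_of_le; omega
    rw [hdropnil, List.append_nil]
    have hlenR : ((List.range (h + 1)).map (fun j => numbers.getD (2 * j) 0)
        ++ (List.range h).map (fun j => numbers.getD (2 * j + 1) 0)).length = numbers.length := by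
      simp; omega
    rw [PySem.List.pyGetD_eq_getElem _ _ hiA0 (by omega),
        PySem.List.pyGetD_eq_getElem _ _ hiB0 hiB1]
    set m : Nat := iA.toNat with hm
    have hmn : m < numbers.length := by omega
    by_cases hcase : m < h + 1
    · -- index lands in the even-position prefix: value numbers[2*m] = numbers[iB]
      have : 2 * iA < (numbers.length : Int) := by omega
      have eB : iB = 2 * iA := by rw [e1]; exact Int.emod_eq_of_lt (by omega) (by omega)
      rw [List.getElem_append_left (by simp only [List.length_map, List.length_range]; exact hcase)]
      simp only [List.getElem_map, List.getElem_range]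
      rw [List.getD_eq_getElem _ _ (by omega)]
      congr 1
      omega
    · -- index lands in the odd-position suffix: value numbers[2*m - n] = numbers[iB]
      have : (numbers.length : Int) ≤ 2 * iA := by omega
      have eB : iB = 2 * iA - (numbers.length : Int) := by
        rw [e1, ← Int.sub_emod_right]
        exact Int.emod_eq_of_lt (by omega) (by omega)
      rw [List.getElem_append_right (by simp only [List.length_map, List.length_range]; omega)]
      simp only [List.getElem_map, List.getElem_range]
      rw [List.getD_eq_getElem _ _ (by simp; omega)]
      congr 1
      simp only [List.length_map, List.length_range]
      omega

-- ===== VERDICT (by name: the statement is the Claim_ definition above) =====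
theorem solution_spec : Claim_equal_solution := by
  intro numbers k _ hpre
  unfold Spec_solution solution solution_alt
  exact pvMain numbers k hpre
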